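-- pv_equiv track=rewrite | github.com/zerohoon0102/Algorithm | programmers/coding60062.py | solution
-- ===== SOURCE A (Python) =====
-- from itertools import permutations
--
-- def spare(n, weak, base_dist, result, check):
--     for j in range(len(weak)):
--         dist_list = permutations(base_dist, result)
--         for tmp_dist in dist_list:
--             weaks = weak[j:] + [x+n for x in weak[:j]]
--             tmp_dist = list(tmp_dist)
--             while( len(tmp_dist) > 0 ):
--                 dist = tmp_dist.pop()
--                 start = weaks[0]
--                 while(start + dist >= weaks[0]):
--                     weaks.pop(0)
--                     if len(weaks) == 0:
--                         return result
--     return -1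
--
-- def solution(n, weaks, base_dist):
--     sort_dist = sorted(base_dist, reverse=True)
--     for i in range(1, len(base_dist)+1):
--         tmp_dist = sort_dist[0:i].copy()
--         t = spare(n, weaks.copy(), tmp_dist, i, [0]*len(weaks))
--         if t > 0:
--             return t
--     return -1
-- ===== SOURCE B (Python) =====
-- def solution(n, weaks, base_dist):
--     m = len(base_dist)
--     top = sorted(base_dist, reverse=True)
--
--     def step(pts, d):
--         # drop the covered prefix: all leading points within [start, start+d]
--         start = pts[0]
--         i = 0
--         while i < len(pts) and pts[i] <= start + d:
--             i += 1
--         return pts[i:]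
--
--     def covers(pts, dists):
--         # can the points be cleared using the given distances in some order?
--         if not pts:
--             return True
--         return any(covers(step(pts, dists[k]), dists[:k] + dists[k + 1:])
--                    for k in range(len(dists)))
--
--     def feasible(i):
--         ds = top[:i]
--         return any(covers(weaks[j:] + [x + n for x in weaks[:j]], ds)
--                    for j in range(len(weaks)))
--
--     if m == 0 or not feasible(m):
--         return -1
--     lo, hi = 1, m  # feasibility is monotone in i: binary search the least feasible i
--     while lo < hi:
--         mid = (lo + hi) // 2
--         if feasible(mid):
--             hi = mid
--         else:
--             lo = mid + 1
--     return lo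
-- ===== Notes on version B (the rewrite author's own statement) =====
-- stated objective: alternative
-- what changed: A grows the candidate subset one size at a time and scans full itertools permutations with destructive list mutation; B tests coverability by recursive backtracking over the remaining distances (stopping as soon as the points are cleared) and binary-searches the least feasible friend count, using that feasibility is monotone in the number of friends.
import Mathlib
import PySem

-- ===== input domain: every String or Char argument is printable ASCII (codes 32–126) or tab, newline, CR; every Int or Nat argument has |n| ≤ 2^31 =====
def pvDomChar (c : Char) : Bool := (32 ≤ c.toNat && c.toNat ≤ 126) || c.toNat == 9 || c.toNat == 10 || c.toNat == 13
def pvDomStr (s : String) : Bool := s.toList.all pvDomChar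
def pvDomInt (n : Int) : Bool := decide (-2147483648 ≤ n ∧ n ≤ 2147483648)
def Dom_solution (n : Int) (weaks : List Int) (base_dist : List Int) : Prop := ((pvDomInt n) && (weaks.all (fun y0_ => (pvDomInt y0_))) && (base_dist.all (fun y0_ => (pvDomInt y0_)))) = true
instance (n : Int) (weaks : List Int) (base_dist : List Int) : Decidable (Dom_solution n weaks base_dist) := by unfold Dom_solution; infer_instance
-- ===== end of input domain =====

-- B replaces A's grow-the-subset permutation scan by a recursive backtracking cover test plus a
-- binary search over the number of friends (feasibility is monotone); objective: alternative.

-- ===== PORT A =====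

-- the inner `while(start + dist >= weaks[0]): weaks.pop(0)` loop (same loop occurs in B's `step`)
def dropCovered (start d : Int) : List Int → List Int
  | [] => []
  | x :: xs => if start + d ≥ x then dropCovered start d xs else x :: xs

-- the `while len(tmp_dist) > 0` loop of `spare`; `tmp_dist.pop()` consumes the permutation tuple
-- back-to-front, so the caller passes the tuple reversed and we consume head-first.
-- `true` = weaks became empty (A's early `return result`), `false` = dists exhausted.
def runA : List Int → List Int → Bool
  | _, [] => true
  | [], _ :: _ => false
  | d :: ds, w :: ws => runA ds (dropCovered w d (w :: ws))

-- weaks = weak[j:] + [x+n for x in weak[:j]]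
def rotP (n : Int) (weak : List Int) (j : Nat) : List Int :=
  weak.drop j ++ (weak.take j).map (fun x => x + n)

-- `for j in range(len(weak))` with the early `return result` from the permutation loop
def spareJ (n : Int) (base_dist : List Int) (result : Int) (weak : List Int) : List Nat → Int
  | [] => -1
  | j :: js =>
    if (PySem.List.permutations base_dist result.toNat).any
        (fun t => runA t.reverse (rotP n weak j)) then result
    else spareJ n base_dist result weak js

def spare (n : Int) (weak : List Int) (base_dist : List Int) (result : Int) (_check : List Int) : Int :=
  spareJ n base_dist result weak (List.range weak.length)

-- `for i in range(1, len(base_dist)+1)` with early return on t > 0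
def solLoop (n : Int) (weaks sort_dist : List Int) : List Nat → Int
  | [] => -1
  | i :: is =>
    let t := spare n weaks (sort_dist.take i) (Int.ofNat i) (List.replicate weaks.length 0)
    if t > 0 then t else solLoop n weaks sort_dist is

def solution (n : Int) (weaks : List Int) (base_dist : List Int) : Int :=
  let sort_dist := PySem.List.sorted base_dist (fun x => x) true
  solLoop n weaks sort_dist (List.range' 1 base_dist.length)

-- ===== PORT B =====

-- B's `covers(pts, dists)`: recursive backtracking; `step` is the same prefix-dropping loop as
-- A's inner while, shared as dropCovered; dists[:k] + dists[k+1:] is eraseIdx.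
def coversB (pts : List Int) (ds : List Int) : Bool :=
  match pts with
  | [] => true
  | p :: ps =>
    (List.range ds.length).attach.any (fun k =>
      coversB (dropCovered p (ds.getD k.1 0) (p :: ps)) (ds.eraseIdx k.1))
termination_by ds.length
decreasing_by
  have hk : k.1 < ds.length := List.mem_range.mp k.2
  simp [List.length_eraseIdx, hk]
  omega

-- B's `feasible(i)`
def feasibleB (n : Int) (weaks top : List Int) (i : Nat) : Bool :=
  (List.range weaks.length).any (fun j =>
    coversB (weaks.drop j ++ (weaks.take j).map (fun x => x + n)) (top.take i))

-- B's `while lo < hi` binary search; lo, hi are nonnegative so Python's // is Nat division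
def bsearchB (f : Nat → Bool) (lo hi : Nat) : Nat :=
  if lo < hi then
    if f ((lo + hi) / 2) then bsearchB f lo ((lo + hi) / 2)
    else bsearchB f ((lo + hi) / 2 + 1) hi
  else lo
termination_by hi - lo
decreasing_by all_goals omega

def solution_alt (n : Int) (weaks : List Int) (base_dist : List Int) : Int :=
  let m := base_dist.length
  let top := PySem.List.sorted base_dist (fun x => x) true
  if m == 0 || !feasibleB n weaks top m then -1
  else Int.ofNat (bsearchB (feasibleB n weaks top) 1 m)

-- ===== PRECONDITION & SPEC =====
def Spec_solution (n : Int) (weaks : List Int) (base_dist : List Int) (out : Int) : Prop := out = solution_alt n weaks base_dist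
instance (n : Int) (weaks : List Int) (base_dist : List Int) (out : Int) : Decidable (Spec_solution n weaks base_dist out) := by unfold Spec_solution; infer_instance

-- ===== CLAIM (what is proved, stated in full; the proofs are below) =====
def Claim_equal_solution : Prop := ∀ (n : Int) (weaks : List Int) (base_dist : List Int), Dom_solution n weaks base_dist → Spec_solution n weaks base_dist (solution n weaks base_dist)

-- ===== LEMMAS AND PROOFS =====

-- "some ordering of the distances ds clears the points pts"
def GoodRun (pts ds : List Int) : Prop := ∃ l : List Int, l.Perm ds ∧ runA l pts = true

theorem runA_empty (l : List Int) : runA l [] = true := by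
  cases l <;> simp [runA]

theorem runA_nil_iff (pts : List Int) : runA [] pts = true ↔ pts = [] := by
  cases pts <;> simp [runA]

theorem runA_mono (l e pts : List Int) (h : runA l pts = true) : runA (l ++ e) pts = true := by
  induction l generalizing pts with
  | nil =>
    have := (runA_nil_iff pts).mp h
    subst this; exact runA_empty e
  | cons d ds ih =>
    cases pts with
    | nil => exact runA_empty _
    | cons p ps =>
      simp only [runA, List.cons_append] at h ⊢
      exact ih _ h

theorem good_append (pts ds e : List Int) (h : GoodRun pts ds) : GoodRun pts (ds ++ e) := by
  obtain ⟨l, hp, hr⟩ := h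
  exact ⟨l ++ e, hp.append (List.Perm.refl e), runA_mono l e pts hr⟩

theorem coversB_cons_iff (p : Int) (ps ds : List Int) :
    coversB (p :: ps) ds = true ↔
      ∃ k, ∃ _ : k < ds.length,
        coversB (dropCovered p (ds.getD k 0) (p :: ps)) (ds.eraseIdx k) = true := by
  rw [coversB]
  simp [List.any_eq_true, List.mem_range]

theorem coversB_iff (N : Nat) (ds pts : List Int) (hlen : ds.length = N) :
    coversB pts ds = true ↔ GoodRun pts ds := by
  induction N using Nat.strong_induction_on generalizing ds pts with
  | _ N ih =>
  cases pts with
  | nil =>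
    simp only [coversB, true_iff]
    exact ⟨ds, List.Perm.refl ds, runA_empty ds⟩
  | cons p ps =>
    rw [coversB_cons_iff]
    constructor
    · rintro ⟨k, hk, hc⟩
      have hlt : (ds.eraseIdx k).length < N := by
        simp [List.length_eraseIdx, hk]; omega
      obtain ⟨l, hp, hr⟩ := (ih _ hlt _ _ rfl).mp hc
      refine ⟨ds.getD k 0 :: l, ?_, ?_⟩
      · have h1 : (ds.getD k 0 :: ds.eraseIdx k).Perm ds := by
          rw [List.getD_eq_getElem ds 0 hk]
          exact List.getElem_cons_eraseIdx_perm hk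
        exact (hp.cons _).trans h1
      · simpa only [runA] using hr
    · rintro ⟨l, hp, hr⟩
      cases l with
      | nil => simp [runA] at hr
      | cons d rest =>
        have hd : d ∈ ds := hp.subset (List.mem_cons_self)
        obtain ⟨k, hk, hdk⟩ := List.getElem_of_mem hd
        have h1 : ds.Perm (d :: ds.eraseIdx k) := by
          rw [← hdk]; exact (List.getElem_cons_eraseIdx_perm hk).symm
        have h2 : rest.Perm (ds.eraseIdx k) := ((hp.trans h1)).cons_inv
        have hlt : (ds.eraseIdx k).length < N := by
          simp [List.length_eraseIdx, hk]; omega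
        refine ⟨k, hk, ?_⟩
        rw [List.getD_eq_getElem ds 0 hk, hdk]
        exact (ih _ hlt _ _ rfl).mpr ⟨rest, h2, by simpa only [runA] using hr⟩

theorem mem_permutations_of_perm (N : Nat) (xs p : List Int) (hlen : xs.length = N)
    (h : p.Perm xs) : p ∈ PySem.List.permutations xs N := by
  induction N using Nat.strong_induction_on generalizing xs p with
  | _ N ih =>
  cases N with
  | zero =>
    have : xs = [] := List.length_eq_zero_iff.mp hlen
    subst this
    have : p = [] := List.Perm.eq_nil h
    simp [this, PySem.List.permutations]
  | succ n =>
    cases p with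
    | nil => exact absurd (h.length_eq) (by simp [hlen])
    | cons a p2 =>
      have ha : a ∈ xs := h.subset (List.mem_cons_self)
      obtain ⟨k, hk, hak⟩ := List.getElem_of_mem ha
      have h1 : xs.Perm (a :: xs.eraseIdx k) := by
        rw [← hak]; exact (List.getElem_cons_eraseIdx_perm hk).symm
      have h2 : p2.Perm (xs.eraseIdx k) := (h.trans h1).cons_inv
      have hlen2 : (xs.eraseIdx k).length = n := by
        simp [List.length_eraseIdx, hk]; omega
      have hmem := ih n (by omega) _ _ hlen2 h2
      rw [PySem.List.permutations]
      simp only [List.mem_flatMap, List.mem_range]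
      refine ⟨k, hk, ?_⟩
      rw [List.getElem?_eq_getElem hk]
      simp only [List.mem_map]
      exact ⟨p2, hmem, by rw [hak]⟩

theorem any_perms_iff (ds pts : List Int) :
    (PySem.List.permutations ds ds.length).any (fun t => runA t.reverse pts) = true ↔
      GoodRun pts ds := by
  simp only [List.any_eq_true]
  constructor
  · rintro ⟨t, ht, hr⟩
    exact ⟨t.reverse, (t.reverse_perm.trans (PySem.List.perm_of_mem_permutations ht)), hr⟩
  · rintro ⟨l, hp, hr⟩
    refine ⟨l.reverse, mem_permutations_of_perm _ _ _ rfl (l.reverse_perm.trans hp), ?_⟩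
    rwa [List.reverse_reverse]

theorem spareJ_eq (n result : Int) (bd weak : List Int) (js : List Nat) :
    spareJ n bd result weak js =
      if js.any (fun j =>
          (PySem.List.permutations bd result.toNat).any
            (fun t => runA t.reverse (rotP n weak j))) then result else -1 := by
  induction js with
  | nil => simp [spareJ]
  | cons j js ih =>
    rw [spareJ, ih]
    by_cases h : (PySem.List.permutations bd result.toNat).any
        (fun t => runA t.reverse (rotP n weak j)) = true <;> simp [h]

theorem spare_eq (n : Int) (weaks top : List Int) (i : Nat) (chk : List Int)
    (hi : i ≤ top.length) :
    spare n weaks (top.take i) (Int.ofNat i) chk =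
      if feasibleB n weaks top i then (Int.ofNat i) else -1 := by
  rw [spare, spareJ_eq]
  have htake : (top.take i).length = i := by simp [hi]
  have hfun : ∀ j : Nat,
      ((PySem.List.permutations (top.take i) (Int.ofNat i).toNat).any
        (fun t => runA t.reverse (rotP n weaks j)))
      = coversB (weaks.drop j ++ (weaks.take j).map (fun x => x + n)) (top.take i) := by
    intro j
    have h0 : (Int.ofNat i).toNat = (top.take i).length := by simp [htake]
    rw [h0]
    apply Bool.eq_iff_iff.mpr
    rw [any_perms_iff, coversB_iff (top.take i).length _ _ rfl]
    rfl
  have hfeq : feasibleB n weaks top i =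
      (List.range weaks.length).any (fun j =>
        (PySem.List.permutations (top.take i) (Int.ofNat i).toNat).any
          (fun t => runA t.reverse (rotP n weaks j))) := by
    unfold feasibleB
    congr 1
    funext j
    rw [hfun j]
  rw [hfeq]

theorem feasibleB_mono (n : Int) (weaks top : List Int) (i j : Nat) (hij : i ≤ j)
    (h : feasibleB n weaks top i = true) : feasibleB n weaks top j = true := by
  unfold feasibleB at h ⊢
  simp only [List.any_eq_true] at h ⊢
  obtain ⟨r, hr, hc⟩ := h
  refine ⟨r, hr, ?_⟩
  have hsplit : top.take j = top.take i ++ (top.drop i).take (j - i) := by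
    rw [← List.take_add]
    congr 1
    omega
  rw [hsplit, coversB_iff _ _ _ rfl]
  exact good_append _ _ _ ((coversB_iff _ _ _ rfl).mp hc)

theorem bsearchB_spec (f : Nat → Bool)
    (mono : ∀ i j, i ≤ j → f i = true → f j = true) :
    ∀ lo hi, lo ≤ hi → f hi = true →
      lo ≤ bsearchB f lo hi ∧ bsearchB f lo hi ≤ hi ∧ f (bsearchB f lo hi) = true ∧
        (∀ i, lo ≤ i → i < bsearchB f lo hi → f i = false) := by
  suffices key : ∀ (fuel lo hi : Nat), hi - lo ≤ fuel → lo ≤ hi → f hi = true →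
      lo ≤ bsearchB f lo hi ∧ bsearchB f lo hi ≤ hi ∧ f (bsearchB f lo hi) = true ∧
        (∀ i, lo ≤ i → i < bsearchB f lo hi → f i = false) by
    intro lo hi h1 h2
    exact key (hi - lo) lo hi le_rfl h1 h2
  intro fuel
  induction fuel with
  | zero =>
    intro lo hi hfuel hle hf
    have : lo = hi := by omega
    rw [bsearchB, if_neg (by omega)]
    exact ⟨le_rfl, hle, this ▸ hf, fun i a b => absurd (lt_of_le_of_lt a b) (lt_irrefl _)⟩
  | succ fuel ih =>
    intro lo hi hfuel hle hf
    rw [bsearchB]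
    by_cases hlt : lo < hi
    · rw [if_pos hlt]
      by_cases hmid : f ((lo + hi) / 2) = true
      · rw [if_pos hmid]
        obtain ⟨a, b, c, d⟩ := ih lo ((lo + hi) / 2) (by omega) (by omega) hmid
        exact ⟨a, by omega, c, d⟩
      · rw [if_neg hmid]
        obtain ⟨a, b, c, d⟩ := ih ((lo + hi) / 2 + 1) hi (by omega) (by omega) hf
        refine ⟨by omega, b, c, ?_⟩
        intro i hi1 hi2
        by_cases hile : i ≤ (lo + hi) / 2
        · by_contra hcon
          exact hmid (mono i _ hile (by simpa using hcon))
        · exact d i (by omega) hi2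
    · rw [if_neg hlt]
      have : lo = hi := by omega
      exact ⟨le_rfl, hle, this ▸ hf, fun i a b => absurd (lt_of_le_of_lt a b) (lt_irrefl _)⟩

theorem solLoop_first (n : Int) (weaks top : List Int) (r : Nat)
    (hr : feasibleB n weaks top r = true) (hrlen : r ≤ top.length)
    (hmin : ∀ i, 1 ≤ i → i < r → feasibleB n weaks top i = false) :
    ∀ k a, 1 ≤ a → a ≤ r → r < a + k →
      solLoop n weaks top (List.range' a k) = Int.ofNat r := by
  intro k
  induction k with
  | zero => intro a _ h2 h3; omega
  | succ k ih =>
    intro a h1 h2 h3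
    rw [List.range'_succ, solLoop]
    rw [spare_eq n weaks top a _ (le_trans h2 hrlen)]
    by_cases hra : a = r
    · subst hra
      rw [if_pos hr]
      have ha0 : 0 < a := by omega
      have hpos : (Int.ofNat a) > 0 := Int.ofNat_lt.mpr ha0
      rw [if_pos hpos]
    · have hlt : a < r := by omega
      rw [if_neg (by simp [hmin a h1 hlt])]
      exact ih (a + 1) (by omega) (by omega) (by omega)

theorem solLoop_none (n : Int) (weaks top : List Int) (k a : Nat)
    (ha : 1 ≤ a) (hk : a + k ≤ top.length + 1)
    (hall : ∀ i, 1 ≤ i → i ≤ top.length → feasibleB n weaks top i = false) :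
    solLoop n weaks top (List.range' a k) = -1 := by
  induction k generalizing a with
  | zero => simp [solLoop]
  | succ k ih =>
    rw [List.range'_succ, solLoop]
    have ha2 : a ≤ top.length := by omega
    rw [spare_eq n weaks top a _ ha2]
    rw [if_neg (by simp [hall a ha ha2])]
    exact ih (a + 1) (by omega) (by omega)

theorem main_eq (n : Int) (weaks base_dist : List Int) :
    solution n weaks base_dist = solution_alt n weaks base_dist := by
  unfold solution solution_alt
  have hlen : (PySem.List.sorted base_dist (fun x => x) true).length = base_dist.length :=
    PySem.List.length_sorted base_dist (fun x => x) true
  set top := PySem.List.sorted base_dist (fun x => x) true with htop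
  by_cases hm : base_dist.length = 0
  · simp [hm, solLoop]
  · by_cases hF : feasibleB n weaks top base_dist.length = true
    · obtain ⟨h1, h2, h3, h4⟩ := bsearchB_spec (feasibleB n weaks top)
        (fun i j hij h => feasibleB_mono n weaks top i j hij h)
        1 base_dist.length (by omega) hF
      rw [solLoop_first n weaks top _ h3 (by omega) (fun i hi1 hir => h4 i hi1 hir)
        base_dist.length 1 le_rfl h1 (by omega)]
      simp [hm, hF]
    · have hFf : feasibleB n weaks top base_dist.length = false := by
        simpa using hF
      have hall : ∀ i, 1 ≤ i → i ≤ top.length → feasibleB n weaks top i = false := by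
        intro i _ hi
        by_contra h
        have := feasibleB_mono n weaks top i base_dist.length (by omega)
          (by simpa using h)
        rw [hFf] at this
        exact Bool.false_ne_true this
      rw [solLoop_none n weaks top base_dist.length 1 le_rfl (by omega) hall]
      simp [hFf]

-- ===== VERDICT (by name: the statement is the Claim_ definition above) =====
theorem solution_spec : Claim_equal_solution := by
  intro n weaks base_dist _
  show solution n weaks base_dist = solution_alt n weaks base_dist
  exact main_eq n weaks base_dist
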